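-- pv_equiv track=rewrite | github.com/seadsystem/Backend | DB/classification/RandomForestModel.py | combineLabels
-- ===== SOURCE A (Python) =====
-- def combineLabels(labels):
--     running = []
--     for i in range(0, len(labels[0])):
--         total = 0
--         for j in range(0, len(labels)):
--             label = labels[j]
--             total += label[i] << j
--         running.append(total)
--     return running
-- ===== SOURCE B (Python) =====
-- def combineLabels(labels):
--     width = len(labels[0])
--
--     def horner(rows):
--         if not rows:
--             return [0] * width
--         rest = horner(rows[1:])
--         row = rows[0]
--         return [row[i] + 2 * rest[i] for i in range(width)]
--
--     return horner(labels)
-- ===== Notes on version B (the rewrite author's own statement) =====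
-- stated objective: alternative
-- what changed: B replaces A's nested shift-and-sum loops by a recursive elementwise Horner scheme on the row list (result = row0 + 2 * combine(remaining rows)), so no bit shifts and no row index appear at all.
import Mathlib
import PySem

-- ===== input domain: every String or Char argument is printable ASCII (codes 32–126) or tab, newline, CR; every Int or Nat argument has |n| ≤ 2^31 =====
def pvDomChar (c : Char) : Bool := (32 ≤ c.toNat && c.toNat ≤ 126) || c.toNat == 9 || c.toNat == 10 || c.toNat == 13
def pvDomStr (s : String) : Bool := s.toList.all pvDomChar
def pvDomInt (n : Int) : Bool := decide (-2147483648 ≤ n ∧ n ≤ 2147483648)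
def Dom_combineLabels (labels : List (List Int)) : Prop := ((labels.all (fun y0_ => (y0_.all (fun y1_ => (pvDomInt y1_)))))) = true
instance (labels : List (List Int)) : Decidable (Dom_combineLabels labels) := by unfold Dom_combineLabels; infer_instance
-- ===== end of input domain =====

-- B recomputes the result by a recursive Horner scheme on the row list (row0 + 2*rest,
-- elementwise) instead of A's nested shift-and-sum loops; same cost, different algorithm
-- (objective: alternative).


-- ===== PORT A =====
-- labels[0] and label[i] are ported via pyGetD; Pre_ excludes exactly the inputs where
-- Python raises IndexError (empty labels, or some row shorter than labels[0]).
def combineLabels (labels : List (List Int)) : List Int :=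
  (PySem.List.pyRange 0 (PySem.List.len (PySem.List.pyGetD labels 0 [])) 1).foldl
    (fun (running : List Int) (i : Int) =>
      running ++
        [(PySem.List.pyRange 0 (PySem.List.len labels) 1).foldl
          (fun (total : Int) (j : Int) =>
            total + (PySem.List.pyGetD (PySem.List.pyGetD labels j []) i 0) <<< j.toNat)
          0])
    []

-- ===== PORT B =====
-- the inner helper 'horner' of Source B (width is captured, recursion on the row list;
-- the comprehension over range(width) is ported as a map over pyRange)
def pvHornerB (width : Int) : List (List Int) → List Int
  | [] => List.replicate width.toNat 0
  | row :: t =>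
      let rest := pvHornerB width t
      (PySem.List.pyRange 0 width 1).map
        (fun i => PySem.List.pyGetD row i 0 + 2 * PySem.List.pyGetD rest i 0)

def combineLabels_alt (labels : List (List Int)) : List Int :=
  pvHornerB (PySem.List.len (PySem.List.pyGetD labels 0 [])) labels

-- ===== PRECONDITION & SPEC =====
-- Pre_ excludes exactly the inputs where Python A raises IndexError: empty labels
-- (labels[0] fails) or a row shorter than labels[0] (label[i] fails); B raises there too.
def Pre_combineLabels (labels : List (List Int)) : Prop :=
  labels ≠ [] ∧ ∀ l ∈ labels, (labels.headD []).length ≤ l.length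
instance (labels : List (List Int)) : Decidable (Pre_combineLabels labels) := by
  unfold Pre_combineLabels; infer_instance
def pvWitness_combineLabels : List (List Int) := [[1, 0, 1], [0, 1, 1]]

def Spec_combineLabels (labels : List (List Int)) (out : List Int) : Prop := out = combineLabels_alt labels
instance (labels : List (List Int)) (out : List Int) : Decidable (Spec_combineLabels labels out) := by unfold Spec_combineLabels; infer_instance

-- ===== CLAIM (what is proved, stated in full; the proofs are below) =====
def Claim_equal_combineLabels : Prop := ∀ (labels : List (List Int)), Dom_combineLabels labels → Pre_combineLabels labels → Spec_combineLabels labels (combineLabels labels)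

-- ===== LEMMAS AND PROOFS =====

-- a <<< n = a * 2^n on Int
lemma pvShift (a : Int) (n : Nat) : a <<< n = a * 2 ^ n := by
  rw [← Int.shiftLeft_natCast_right, Int.shiftLeft_eq_mul_pow]
  push_cast; ring

-- the Horner value of column i
def pvH (ls : List (List Int)) (i : Int) : Int :=
  match ls with
  | [] => 0
  | l :: t => PySem.List.pyGetD l i 0 + 2 * pvH t i

-- A's column value (running shift sum starting at plane s)
def pvColSum (ls : List (List Int)) (s : Int) (i : Int) : Int :=
  match ls with
  | [] => 0
  | l :: t => (PySem.List.pyGetD l i 0) <<< s.toNat + pvColSum t (s + 1) i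

lemma pvColSum_eq_horner (ls : List (List Int)) (s : Int) (hs : 0 ≤ s) (i : Int) :
    pvColSum ls s i = (pvH ls i) <<< s.toNat := by
  induction ls generalizing s with
  | nil => simp [pvColSum, pvH, pvShift]
  | cons l t ih =>
      have h1 : (s + 1).toNat = s.toNat + 1 := by omega
      simp only [pvColSum, pvH, ih (s + 1) (by omega), pvShift, h1]
      ring

lemma pvColSum_eq_sum (ls : List (List Int)) (s : Int) (i : Int) :
    ((PySem.List.enumerate ls s).map
      (fun (p : Int × List Int) => ((PySem.List.pyGetD p.2 i 0) <<< p.1.toNat : Int))).sum = pvColSum ls s i := by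
  induction ls generalizing s with
  | nil => simp [pvColSum, PySem.List.enumerate]
  | cons l t ih =>
      rw [PySem.List.enumerate_cons]
      simp [pvColSum, ih (s + 1)]

-- A's inner loop computes pvColSum labels 0 i
lemma pvInnerA (labels : List (List Int)) (i : Int) :
    (PySem.List.pyRange 0 (PySem.List.len labels) 1).foldl
      (fun (total : Int) (j : Int) =>
        total + (PySem.List.pyGetD (PySem.List.pyGetD labels j []) i 0) <<< j.toNat) 0
    = pvColSum labels 0 i := by
  have h := PySem.List.enumerate_eq_map_pyRange labels ([] : List Int)
  rw [PySem.List.foldl_add, ← pvColSum_eq_sum labels 0 i, h, List.map_map, zero_add]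
  rfl

-- B's recursion computes the Horner value columnwise
lemma pvHornerB_eq (w : Int) (ls : List (List Int)) :
    pvHornerB w ls = (PySem.List.pyRange 0 w 1).map (fun i => pvH ls i) := by
  induction ls with
  | nil =>
      simp only [pvHornerB, pvH]
      symm
      rw [List.eq_replicate_iff]
      refine ⟨by simp [PySem.List.length_pyRange_one], ?_⟩
      intro b hb
      rcases List.mem_map.mp hb with ⟨i, _, rfl⟩
      rfl
  | cons l t ih =>
      simp only [pvHornerB, ih]
      apply List.map_congr_left
      intro i hi
      rcases (PySem.List.mem_pyRange_one).mp hi with ⟨h0, hw⟩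
      rw [PySem.List.pyGetD_map_pyRange_of_nonneg _ _ _ _ h0 (by simpa using hw)]
      rfl

-- ===== VERDICT (by name: the statement is the Claim_ definition above) =====
theorem combineLabels_spec : Claim_equal_combineLabels := by
  intro labels _ _
  unfold Spec_combineLabels combineLabels combineLabels_alt
  rw [PySem.List.foldl_append_singleton_eq_map
    (fun i => (PySem.List.pyRange 0 (PySem.List.len labels) 1).foldl
      (fun (total : Int) (j : Int) =>
        total + (PySem.List.pyGetD (PySem.List.pyGetD labels j []) i 0) <<< j.toNat) 0)]
  rw [pvHornerB_eq]
  simp only [List.nil_append, pvInnerA]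
  apply List.map_congr_left
  intro i _
  rw [pvColSum_eq_horner labels 0 le_rfl i, pvShift]
  simp
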